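-- pv_equiv track=rewrite | github.com/FilmonMeharii/pyhton-for-programming-for-Industrial-Applications | exercises/exercise 6/membership_operator.py | robbers_language
-- ===== SOURCE A (Python) =====
-- def robbers_language(word):
--     vowels = frozenset('aeiouAEIOU')
--     translation = ''
--
--     for char in word:
--         translation += char
--         if char in vowels:
--             translation += 'b' + char
--     return translation
-- ===== SOURCE B (Python) =====
-- def robbers_language(word):
--     for v in 'aeiouAEIOU':
--         word = word.replace(v, v + 'b' + v)
--     return word
-- ===== Notes on version B (the rewrite author's own statement) =====
-- stated objective: alternative
-- what changed: Replaces A's single character-by-character pass with an if-in-vowels branch by ten staged whole-string str.replace passes, one per vowel; correct because each pass inserts only the consonant marker and copies of the vowel just processed, which no later pass touches.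
import Mathlib
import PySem

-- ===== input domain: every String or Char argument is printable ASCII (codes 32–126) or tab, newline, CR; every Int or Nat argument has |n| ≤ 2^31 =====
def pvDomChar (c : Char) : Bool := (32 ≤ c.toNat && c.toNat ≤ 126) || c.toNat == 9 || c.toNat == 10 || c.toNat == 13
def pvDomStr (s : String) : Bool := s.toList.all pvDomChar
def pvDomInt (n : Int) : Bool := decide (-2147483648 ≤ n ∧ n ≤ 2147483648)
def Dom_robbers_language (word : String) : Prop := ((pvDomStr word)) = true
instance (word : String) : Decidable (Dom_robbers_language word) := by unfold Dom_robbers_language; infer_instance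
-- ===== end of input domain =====

-- B replaces A's single characterwise scan (with an if-in-vowels membership branch) by ten
-- staged whole-string replace passes, one str.replace per vowel (objective: alternative).

-- ===== PORT A =====
-- vowels = frozenset('aeiouAEIOU')
def rlVowels : PySem.Set Char := PySem.Set.ofList "aeiouAEIOU".toList

def robbers_language (word : String) : String :=
  word.toList.foldl
    (fun translation char =>
      let translation := translation ++ char.toString
      if rlVowels.contains char then translation ++ "b" ++ char.toString else translation)
    ""

-- ===== PORT B =====
-- for v in 'aeiouAEIOU': word = word.replace(v, v + 'b' + v)
def robbers_language_alt (word : String) : String :=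
  "aeiouAEIOU".toList.foldl
    (fun w v => PySem.Str.replace w (String.singleton v) (v.toString ++ "b" ++ v.toString))
    word

-- ===== PRECONDITION & SPEC =====
def Spec_robbers_language (word : String) (out : String) : Prop := out = robbers_language_alt word
instance (word : String) (out : String) : Decidable (Spec_robbers_language word out) := by unfold Spec_robbers_language; infer_instance

-- ===== CLAIM (what is proved, stated in full; the proofs are below) =====
def Claim_equal_robbers_language : Prop := ∀ (word : String), Dom_robbers_language word → Spec_robbers_language word (robbers_language word)

-- ===== LEMMAS AND PROOFS =====

-- the characterwise substitution after the vowels in `vs` have been processed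
def rlSub (vs : List Char) (c : Char) : List Char := if c ∈ vs then [c, 'b', c] else [c]

-- replace with a single-character needle is a flatMap
theorem rl_go_single (v : Char) (new : List Char) :
    ∀ (fuel : Nat) (l acc : List Char), l.length ≤ fuel →
      PySem.Chars.replace.go [v] new fuel l acc
        = acc.reverse ++ l.flatMap (fun c => if c = v then new else [c]) := by
  intro fuel
  induction fuel with
  | zero =>
    intro l acc h
    have : l = [] := List.eq_nil_of_length_eq_zero (Nat.le_zero.mp h)
    subst this
    simp [PySem.Chars.replace.go]
  | succ n ih =>
    intro l acc h
    cases l with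
    | nil => simp [PySem.Chars.replace.go]
    | cons c t =>
      rw [PySem.Chars.replace.go]
      by_cases hc : c = v
      · subst hc
        simp [List.isPrefixOf, ih t _ (Nat.le_of_succ_le_succ h)]
      · simp [List.isPrefixOf, hc, Ne.symm hc, ih t _ (Nat.le_of_succ_le_succ h)]

theorem rl_replace_single (v : Char) (new : List Char) (l : List Char) :
    PySem.Chars.replace l [v] new = l.flatMap (fun c => if c = v then new else [c]) := by
  rw [PySem.Chars.replace]
  simp [rl_go_single v new l.length l [] (Nat.le_refl _)]

-- one staged pass advances the substitution from `vs` to `vs ++ [v]`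
theorem rl_stage (vs : List Char) (v : Char) (hv : v ∉ vs) (hb : v ≠ 'b') (s : List Char) :
    PySem.Chars.replace (s.flatMap (rlSub vs)) [v] [v, 'b', v]
      = s.flatMap (rlSub (vs ++ [v])) := by
  rw [rl_replace_single, List.flatMap_assoc]
  refine List.flatMap_congr ?_
  intro c _
  by_cases hcvs : c ∈ vs
  · have hcv : c ≠ v := fun h => hv (h ▸ hcvs)
    simp [rlSub, hcvs, hcv, Ne.symm hb]
  · by_cases hcv : c = v
    · subst hcv
      simp [rlSub, hcvs]
    · simp [rlSub, hcvs, hcv]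

-- the whole fold of staged passes
theorem rl_fold (rest : List Char) :
    ∀ (vs : List Char), (vs ++ rest).Nodup → 'b' ∉ rest → ∀ (s : List Char),
      rest.foldl (fun w v => PySem.Chars.replace w [v] [v, 'b', v]) (s.flatMap (rlSub vs))
        = s.flatMap (rlSub (vs ++ rest)) := by
  induction rest with
  | nil => intro vs _ _ s; simp
  | cons v t ih =>
    intro vs hnd hb s
    have hv : v ∉ vs := by
      have := List.Nodup.of_append_right (l₁ := vs) (by simpa using hnd)
      intro hmem
      exact (List.disjoint_of_nodup_append hnd) hmem (List.mem_cons_self ..)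
    have hvb : v ≠ 'b' := fun h => hb (h ▸ List.mem_cons_self ..)
    have hnd' : ((vs ++ [v]) ++ t).Nodup := by simpa [List.append_assoc] using hnd
    simp only [List.foldl_cons, rl_stage vs v hv hvb s,
      ih (vs ++ [v]) hnd' (fun h => hb (List.mem_cons_of_mem _ h)) s]
    simp [List.append_assoc]

-- A's accumulator characterisation
theorem rl_acc (l : List Char) (acc : String) :
    l.foldl
      (fun translation char =>
        let translation := translation ++ char.toString
        if rlVowels.contains char then translation ++ "b" ++ char.toString else translation)
      acc
      = acc ++ String.ofList (l.flatMap (rlSub "aeiouAEIOU".toList)) := by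
  induction l generalizing acc with
  | nil => simp
  | cons c rest ih =>
    simp only [List.foldl_cons, ih]
    have hm : (c ∈ rlVowels) ↔ (c ∈ "aeiouAEIOU".toList) :=
      PySem.Set.mem_ofList "aeiouAEIOU".toList c
    simp only [rlSub, List.flatMap_cons, PySem.Set.contains, List.contains_eq_mem, hm,
      decide_eq_true_eq]
    split_ifs with h <;> simp [String.ext_iff]

-- B's String fold reduces to the Chars fold
theorem rl_str_fold (cs : List Char) (w : String) :
    cs.foldl
      (fun w v => PySem.Str.replace w (String.singleton v) (v.toString ++ "b" ++ v.toString))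
      w
      = String.ofList
          (cs.foldl (fun l v => PySem.Chars.replace l [v] [v, 'b', v]) w.toList) := by
  induction cs generalizing w with
  | nil => simp
  | cons v t ih =>
    have hstep : (PySem.Str.replace w (String.singleton v)
        (v.toString ++ "b" ++ v.toString)).toList
        = PySem.Chars.replace w.toList [v] [v, 'b', v] := by
      simp [PySem.Str.replace]
    rw [List.foldl_cons, List.foldl_cons, ih, hstep]

-- ===== VERDICT (by name: the statement is the Claim_ definition above) =====
theorem robbers_language_spec : Claim_equal_robbers_language := by
  intro word _
  unfold Spec_robbers_language robbers_language robbers_language_alt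
  rw [rl_acc word.toList "", rl_str_fold]
  have h0 : word.toList = (word.toList).flatMap (rlSub []) := by
    conv_rhs => rw [show rlSub [] = fun c => [c] from funext fun c => by simp [rlSub]]
    simp
  rw [show ("aeiouAEIOU".toList.foldl (fun l v => PySem.Chars.replace l [v] [v, 'b', v]) word.toList)
      = "aeiouAEIOU".toList.foldl (fun l v => PySem.Chars.replace l [v] [v, 'b', v])
          ((word.toList).flatMap (rlSub [])) from by rw [← h0],
    rl_fold "aeiouAEIOU".toList [] (by decide) (by decide) word.toList]
  simp
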